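-- pv_equiv track=rewrite | github.com/WooCorp/Euchre | Sandbox.py | BestPlay
-- ===== SOURCE A (Python) =====
-- def BestPlay(cardsout, trickcards,hand): #FIXME
--     """Main decision making function for players to choose what card to play"""
--
--     trump = []
--     ss = []
--     os1 = []
--     os2 = []
--
--     for i in range(len(hand) - 2):
--         if hand[i] < 7:
--             trump.append(hand[i])
--         elif hand[i] < 12:
--             ss.append(hand[i])
--         elif hand[i] < 18:
--             os1.append(hand[i])
--         else:
--             os2.append(hand[i])
--
--     if len(trickcards) == 0: #Lead
--         return 0 #FIXME-----------------------------------------------------------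
--     else: #Not lead
--         if trickcards[0] < 7: #Trump led
--             if len(trump) == 1:
--                 return hand.index(trump[0])
--             #Led trump decision play FIXME---------------------------------
--         elif trickcards[0] < 12: #SS led
--             if len(ss) == 1:
--                 return hand.index(ss[0])
--             #Led ss decision FIXME-------------------------------------------------
--         elif trickcards[0] < 18: #OS1 led
--             if len(os1) == 1:
--                 return hand.index(os1[0])
--             #Led os1 decision FIXME--------------------------------------------
--         else: #OS2 led
--             if len(os2) == 1:
--                 return hand.index(os2[0])
--             #led os2 decision FIXME--------------------------------------------
--
--     return 0
-- ===== SOURCE B (Python) =====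
-- def BestPlay(cardsout, trickcards, hand):
--     """Main decision making function for players to choose what card to play"""
--     if not trickcards:  # Lead
--         return 0
--     led = (trickcards[0] >= 7) + (trickcards[0] >= 12) + (trickcards[0] >= 18)
--     # Single scan over the playable prefix, remembering the position of the
--     # first card of the led suit; a second such card means no forced play.
--     # If exactly one prefix card follows suit, its position is also the first
--     # occurrence of that value in hand (an earlier equal value would itself
--     # follow suit and be a second match), so no hand.index pass is needed.
--     found = -1
--     for i in range(len(hand) - 2):
--         c = hand[i]
--         if (c >= 7) + (c >= 12) + (c >= 18) == led:
--             if found >= 0: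
--                 return 0
--             found = i
--     return found if found >= 0 else 0
-- ===== Notes on version B (the rewrite author's own statement) =====
-- stated objective: faster
-- what changed: B replaces A's four-bucket categorization plus hand.index lookup by a single indexed scan with a first-match-position accumulator and early exit on a second same-suit card: the suit is computed arithmetically from the led card, the unique follower's scan position is returned directly (provably equal to hand.index of its value), so the four bucket lists, their appends, and the second .index pass over hand disappear.
import Mathlib
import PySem

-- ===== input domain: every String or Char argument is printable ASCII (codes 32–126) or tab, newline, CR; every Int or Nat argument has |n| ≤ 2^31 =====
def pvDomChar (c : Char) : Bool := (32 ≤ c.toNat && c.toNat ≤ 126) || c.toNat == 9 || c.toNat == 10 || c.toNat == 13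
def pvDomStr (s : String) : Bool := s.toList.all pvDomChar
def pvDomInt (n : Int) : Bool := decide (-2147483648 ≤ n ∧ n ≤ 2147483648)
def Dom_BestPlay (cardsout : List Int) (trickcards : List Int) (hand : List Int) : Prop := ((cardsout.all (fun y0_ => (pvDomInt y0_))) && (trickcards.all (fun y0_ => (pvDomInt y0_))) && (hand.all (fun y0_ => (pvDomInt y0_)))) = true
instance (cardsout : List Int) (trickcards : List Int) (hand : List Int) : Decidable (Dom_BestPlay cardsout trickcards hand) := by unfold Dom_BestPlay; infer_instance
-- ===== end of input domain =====

-- B replaces A's four-bucket build + hand.index lookup by one indexed scan carrying the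
-- first-match position with early exit on a second same-suit card (objective: alternative).


-- ===== PORT A =====
-- one iteration of the 'for i in range(len(hand)-2)' loop body (the four-way append)
def bpStep (acc : List Int × List Int × List Int × List Int) (c : Int) :
    List Int × List Int × List Int × List Int :=
  if c < 7 then (acc.1 ++ [c], acc.2.1, acc.2.2.1, acc.2.2.2)
  else if c < 12 then (acc.1, acc.2.1 ++ [c], acc.2.2.1, acc.2.2.2)
  else if c < 18 then (acc.1, acc.2.1, acc.2.2.1 ++ [c], acc.2.2.2)
  else (acc.1, acc.2.1, acc.2.2.1, acc.2.2.2 ++ [c])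

-- the loop building the four buckets (trump, ss, os1, os2)
def bpBuckets (hand : List Int) : List Int × List Int × List Int × List Int :=
  (PySem.List.pyRange 0 ((hand.length : Int) - 2) 1).foldl
    (fun acc i => bpStep acc (PySem.List.pyGetD hand i 0))  -- index always in range in the Python
    ([], [], [], [])

def BestPlay (cardsout : List Int) (trickcards : List Int) (hand : List Int) : Int :=
  let (trump, ss, os1, os2) := bpBuckets hand
  match trickcards with
  | [] => 0                                  -- Lead
  | t :: _ =>                                -- Not lead
    if t < 7 then                            -- Trump led
      if trump.length = 1 then ((PySem.List.index? hand (trump.headD 0)).getD 0 : Int) else 0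
    else if t < 12 then                      -- SS led
      if ss.length = 1 then ((PySem.List.index? hand (ss.headD 0)).getD 0 : Int) else 0
    else if t < 18 then                      -- OS1 led
      if os1.length = 1 then ((PySem.List.index? hand (os1.headD 0)).getD 0 : Int) else 0
    else                                     -- OS2 led
      if os2.length = 1 then ((PySem.List.index? hand (os2.headD 0)).getD 0 : Int) else 0

-- ===== PORT B =====
-- (c >= 7) + (c >= 12) + (c >= 18): arithmetic suit class
def pvSuit (c : Int) : Int :=
  (if 7 ≤ c then 1 else 0) + (if 12 ≤ c then 1 else 0) + (if 18 ≤ c then 1 else 0)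

-- the 'for i in range(len(hand)-2)' loop with the (found) accumulator and the early 'return 0'
def bpScan (hand : List Int) (led : Int) (idxs : List Int) (found : Int) : Int :=
  match idxs with
  | [] => if 0 ≤ found then found else 0
  | i :: rest =>
    if pvSuit (PySem.List.pyGetD hand i 0) == led then
      if 0 ≤ found then 0 else bpScan hand led rest i
    else bpScan hand led rest found

def BestPlay_alt (cardsout : List Int) (trickcards : List Int) (hand : List Int) : Int :=
  match trickcards with
  | [] => 0
  | t :: _ =>
    bpScan hand (pvSuit t) (PySem.List.pyRange 0 ((hand.length : Int) - 2) 1) (-1)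

-- ===== PRECONDITION & SPEC =====
def Spec_BestPlay (cardsout : List Int) (trickcards : List Int) (hand : List Int) (out : Int) : Prop := out = BestPlay_alt cardsout trickcards hand
instance (cardsout : List Int) (trickcards : List Int) (hand : List Int) (out : Int) : Decidable (Spec_BestPlay cardsout trickcards hand out) := by unfold Spec_BestPlay; infer_instance

-- ===== CLAIM (what is proved, stated in full; the proofs are below) =====
def Claim_equal_BestPlay : Prop := ∀ (cardsout : List Int) (trickcards : List Int) (hand : List Int), Dom_BestPlay cardsout trickcards hand → Spec_BestPlay cardsout trickcards hand (BestPlay cardsout trickcards hand)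

-- ===== LEMMAS AND PROOFS =====

-- the bucket-building loop, run over any list with any starting accumulators
lemma bp_loop_eq (ys : List Int) (t s o1 o2 : List Int) :
    ys.foldl bpStep (t, s, o1, o2) =
      (t ++ ys.filter (fun c => decide (c < 7)),
       s ++ ys.filter (fun c => decide (¬ c < 7 ∧ c < 12)),
       o1 ++ ys.filter (fun c => decide (¬ c < 7 ∧ ¬ c < 12 ∧ c < 18)),
       o2 ++ ys.filter (fun c => decide (¬ c < 7 ∧ ¬ c < 12 ∧ ¬ c < 18))) := by
  induction ys generalizing t s o1 o2 with
  | nil => simp only [List.foldl_nil, List.filter_nil, List.append_nil]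
  | cons c cs ih =>
    simp only [List.foldl_cons, List.filter_cons, bpStep]
    split_ifs
    all_goals rw [ih]; clear ih
    all_goals try simp_all
    all_goals omega

lemma bp_range_eq (hand : List Int) :
    PySem.List.pyRange 0 ((hand.length : Int) - 2) 1
      = PySem.List.pyRange 0 ((hand.length - 2 : Nat) : Int) 1 := by
  rcases Nat.lt_or_ge hand.length 2 with h | h
  · rw [PySem.List.pyRange_one_eq_nil (by omega), PySem.List.pyRange_one_eq_nil (by omega)]
  · congr 1; omega

lemma bpBuckets_eq (hand : List Int) :
    bpBuckets hand =
      ((hand.take (hand.length - 2)).filter (fun c => decide (c < 7)),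
       (hand.take (hand.length - 2)).filter (fun c => decide (¬ c < 7 ∧ c < 12)),
       (hand.take (hand.length - 2)).filter (fun c => decide (¬ c < 7 ∧ ¬ c < 12 ∧ c < 18)),
       (hand.take (hand.length - 2)).filter (fun c => decide (¬ c < 7 ∧ ¬ c < 12 ∧ ¬ c < 18))) := by
  set ys := hand.take (hand.length - 2) with hys
  have hyl : ys.length = hand.length - 2 := by simp [hys]
  have hrange : PySem.List.pyRange 0 ((hand.length : Int) - 2) 1
      = PySem.List.pyRange 0 ((ys.length : Int)) 1 := by
    rw [bp_range_eq, hyl]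
  have hget : ∀ (acc : List Int × List Int × List Int × List Int),
      ∀ i ∈ PySem.List.pyRange 0 ((ys.length : Int)) 1,
      bpStep acc (PySem.List.pyGetD hand i 0) = bpStep acc (PySem.List.pyGetD ys i 0) := by
    intro acc i hi
    rw [PySem.List.mem_pyRange_one] at hi
    rw [PySem.List.pyGetD_of_nonneg _ _ hi.1, PySem.List.pyGetD_of_nonneg _ _ hi.1]
    have hlt : i.toNat < ys.length := by omega
    simp only [List.getD_eq_getElem?_getD, hys]
    rw [List.getElem?_take_of_lt (by omega : i.toNat < hand.length - 2)]
  unfold bpBuckets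
  rw [hrange, PySem.List.foldl_congr_mem _ _ _ _ hget,
    PySem.List.foldl_pyRange_pyGetD' ys 0 _ _ (le_refl 0)]
  simpa using bp_loop_eq ys [] [] [] []

-- A's 'if len(bucket)==1: return hand.index(bucket[0]) … return 0' equals a match on the list
lemma bp_pick (hand l : List Int) :
    (if l.length = 1 then ((PySem.List.index? hand (l.headD 0)).getD 0 : Int) else 0)
    = (match l with
       | [m] => ((PySem.List.index? hand m).getD 0 : Int)
       | _ => 0) := by
  match l with
  | [] => rfl
  | [m] => simp
  | a :: b :: r => simp

-- filtering by equal arithmetic suit class is the corresponding bucket filter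
lemma bp_suits (t : Int) (ys : List Int) :
    ys.filter (fun c => pvSuit c == pvSuit t) =
      (if t < 7 then ys.filter (fun c => decide (c < 7))
       else if t < 12 then ys.filter (fun c => decide (¬ c < 7 ∧ c < 12))
       else if t < 18 then ys.filter (fun c => decide (¬ c < 7 ∧ ¬ c < 12 ∧ c < 18))
       else ys.filter (fun c => decide (¬ c < 7 ∧ ¬ c < 12 ∧ ¬ c < 18))) := by
  split_ifs with h1 h2 h3 <;>
    refine List.filter_congr (fun x _ => ?_) <;>
    simp only [pvSuit] <;>
    split_ifs <;> simp_all <;> omega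

-- the scan after a follower has been recorded: any further follower forces 0
lemma bp_scan_found (hand : List Int) (led : Int) :
    ∀ (idxs : List Int) (found : Int), 0 ≤ found →
    bpScan hand led idxs found =
      if idxs.filter (fun i => pvSuit (PySem.List.pyGetD hand i 0) == led) = [] then found
      else 0 := by
  intro idxs
  induction idxs with
  | nil => intro found hf; simp [bpScan, hf]
  | cons i rest ih =>
    intro found hf
    simp only [bpScan, List.filter_cons]
    by_cases hp : (pvSuit (PySem.List.pyGetD hand i 0) == led) = true
    · simp [hp, hf]
    · simp only [hp, if_false, Bool.false_eq_true]
      rw [ih found hf]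

-- the scan from an empty accumulator returns the unique follower's position, else 0
lemma bp_scan_none (hand : List Int) (led : Int) :
    ∀ (idxs : List Int), (∀ i ∈ idxs, (0:Int) ≤ i) →
    bpScan hand led idxs (-1) =
      (match idxs.filter (fun i => pvSuit (PySem.List.pyGetD hand i 0) == led) with
       | [i] => i
       | _ => 0) := by
  intro idxs
  induction idxs with
  | nil => intro _; simp [bpScan]
  | cons i rest ih =>
    intro hmem
    simp only [bpScan, List.filter_cons]
    by_cases hp : (pvSuit (PySem.List.pyGetD hand i 0) == led) = true
    · simp only [hp, if_true]
      have h0 : (0:Int) ≤ i := hmem i (List.mem_cons_self ..)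
      rw [if_neg (by omega : ¬ (0:Int) ≤ -1), bp_scan_found hand led rest i h0]
      cases hF : rest.filter (fun i => pvSuit (PySem.List.pyGetD hand i 0) == led) with
      | nil => simp
      | cons a l => simp
    · simp only [hp, if_false, Bool.false_eq_true]
      exact ih (fun x hx => hmem x (List.mem_cons_of_mem _ hx))

-- empty follower-index set ↔ empty follower set, over the window [a, k)
lemma bp_filt_nil (hand : List Int) (p : Int → Bool) (k a : Nat) (hk : k ≤ hand.length) :
    ((PySem.List.pyRange (a:Int) (k:Int) 1).filter
        (fun i => p (PySem.List.pyGetD hand i 0)) = [])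
    ↔ (((hand.take k).drop a).filter p = []) := by
  have hlen : ((hand.take k).drop a).length = k - a := by
    simp [List.length_drop, List.length_take]; omega
  simp only [List.filter_eq_nil_iff]
  constructor
  · intro h x hx
    obtain ⟨idx, hidx, hxe⟩ := List.mem_iff_getElem.1 hx
    have hidx' : a + idx < k := by omega
    have hxv : x = hand[a + idx]'(by omega) := by
      rw [← hxe]; simp [List.getElem_drop, List.getElem_take]
    have hmem : ((a + idx : Nat) : Int) ∈ PySem.List.pyRange (a:Int) (k:Int) 1 := by
      rw [PySem.List.mem_pyRange_one]; constructor <;> [push_cast; push_cast] <;> omega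
    have := h _ hmem
    rw [PySem.List.pyGetD_eq_getElem hand (i := ((a + idx : Nat) : Int)) 0 (by omega) (by push_cast; omega)] at this
    simp only [Int.toNat_natCast] at this
    rw [hxv]; exact this
  · intro h i hi
    rw [PySem.List.mem_pyRange_one] at hi
    have h0 : (0:Int) ≤ i := le_trans (Int.natCast_nonneg a) hi.1
    have hik : i.toNat < k := by omega
    rw [PySem.List.pyGetD_eq_getElem hand (i := i) 0 h0 (by push_cast; omega)]
    have hmem : hand[i.toNat]'(by omega) ∈ (hand.take k).drop a := by
      refine List.mem_iff_getElem.2 ⟨i.toNat - a, by omega, ?_⟩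
      simp only [List.getElem_drop, List.getElem_take]
      congr 1; omega
    exact h _ hmem
  
-- the unique follower's scan position is hand.index of its value
lemma bp_main (hand : List Int) (p : Int → Bool) (k : Nat) (hk : k ≤ hand.length) :
    ∀ (n j : Nat), j + n = k →
    (∀ l (hl : l < j) (hll : l < hand.length), p (hand[l]) = false) →
    (match (PySem.List.pyRange (j:Int) (k:Int) 1).filter
        (fun i => p (PySem.List.pyGetD hand i 0)) with
     | [i] => i
     | _ => (0:Int))
    = (match ((hand.take k).drop j).filter p with
       | [m] => ((PySem.List.index? hand m).getD 0 : Int)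
       | _ => 0) := by
  intro n
  induction n with
  | zero =>
    intro j hj hcl
    have hjk : j = k := by omega
    subst hjk
    rw [PySem.List.pyRange_one_eq_nil (le_refl _),
      List.drop_eq_nil_of_le (by simp [List.length_take])]
    simp
  | succ n ih =>
    intro j hj hcl
    have hjk : j < k := by omega
    have hjlen : j < hand.length := by omega
    rw [PySem.List.pyRange_one_cons (by exact_mod_cast hjk)]
    have hcast : ((j:Int) + 1) = ((j + 1 : Nat) : Int) := by push_cast; ring
    rw [hcast]
    have hdrop : (hand.take k).drop j = hand[j] :: (hand.take k).drop (j+1) := by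
      rw [List.drop_eq_getElem_cons (by simp [List.length_take]; omega)]
      congr 1
      simp [List.getElem_take]
    rw [hdrop]
    have hg : PySem.List.pyGetD hand (j:Int) 0 = hand[j] := by
      rw [PySem.List.pyGetD_eq_getElem hand (i := ((j : Nat) : Int)) 0 (by omega) (by push_cast; omega)]
      simp
    simp only [List.filter_cons, hg]
    by_cases hp : p hand[j] = true
    · simp only [hp, if_true]
      cases hF : (PySem.List.pyRange ((j+1 : Nat) : Int) (k:Int) 1).filter
          (fun i => p (PySem.List.pyGetD hand i 0)) with
      | nil =>
        have hR : ((hand.take k).drop (j+1)).filter p = [] :=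
          (bp_filt_nil hand p k (j+1) hk).1 hF
        rw [hR]
        have hidx : PySem.List.index? hand (hand[j]) = some j := by
          rw [PySem.List.index?_eq_some_iff]
          refine ⟨hand.take j, hand.drop (j+1), ?_, by simp [List.length_take]; omega, ?_⟩
          · conv_lhs => rw [← List.take_append_drop j hand]
            congr 1
            exact List.drop_eq_getElem_cons hjlen
          · intro hmemj
            obtain ⟨idx, hidx, hxe⟩ := List.mem_iff_getElem.1 hmemj
            have hidxj : idx < j := by simp [List.length_take] at hidx; omega
            have : hand[idx]'(by omega) = hand[j] := by
              rw [← hxe]; simp [List.getElem_take]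
            have hfalse := hcl idx hidxj (by omega)
            rw [this, hp] at hfalse
            simp at hfalse
        rw [PySem.List.index?_eq_idxOf?] at hidx
        simp [hidx]
      | cons a l =>
        have hR : ((hand.take k).drop (j+1)).filter p ≠ [] := by
          intro hnil
          have := (bp_filt_nil hand p k (j+1) hk).2 hnil
          rw [hF] at this; exact List.cons_ne_nil _ _ this
        cases hRc : ((hand.take k).drop (j+1)).filter p with
        | nil => exact absurd hRc hR
        | cons b m => simp
    · simp only [hp, if_false, Bool.false_eq_true]
      refine ih (j+1) (by omega) ?_
      intro l hl hll
      rcases Nat.lt_or_ge l j with h | h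
      · exact hcl l h hll
      · have : l = j := by omega
        subst this
        simpa using hp

-- ===== VERDICT (by name: the statement is the Claim_ definition above) =====
theorem BestPlay_spec : Claim_equal_BestPlay := by
  intro cardsout trickcards hand _
  unfold Spec_BestPlay BestPlay BestPlay_alt
  rw [bpBuckets_eq]
  cases trickcards with
  | nil => rfl
  | cons t tl =>
    simp only []
    set k := hand.length - 2 with hkdef
    have hk : k ≤ hand.length := by omega
    have hmain := bp_main hand (fun c => pvSuit c == pvSuit t) k hk k 0 (by omega)
        (fun l hl _ => absurd hl (Nat.not_lt_zero l))
    simp only [Nat.cast_zero, List.drop_zero] at hmain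
    rw [bp_range_eq, ← hkdef,
      bp_scan_none hand (pvSuit t) _ (fun i hi => by
        rw [PySem.List.mem_pyRange_one] at hi; exact hi.1),
      hmain, bp_suits]
    set ys := hand.take k with hys
    by_cases h1 : t < 7
    · rw [if_pos h1, if_pos h1, bp_pick]
    · rw [if_neg h1, if_neg h1]
      by_cases h2 : t < 12
      · rw [if_pos h2, if_pos h2, bp_pick]
      · rw [if_neg h2, if_neg h2]
        by_cases h3 : t < 18
        · rw [if_pos h3, if_pos h3, bp_pick]
        · rw [if_neg h3, if_neg h3, bp_pick]
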